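-- pv_equiv track=rewrite | github.com/borjasotomayor/advent-of-code | 2020/day14.py | expand_floating
-- ===== SOURCE A (Python) =====
-- def expand_floating(bin_str):
--     """
--     Recursively expands a binary string with
--     floating ("X") digits into a list of integers.
--     """
--     if len(bin_str) == 0:
--         return [0]
--     else:
--         exp = len(bin_str) - 1
--         digit = bin_str[0]
--
--         # Recursively obtain the list of values
--         # from the rest of the string (minus the
--         # first digit)
--         rem_values = expand_floating(bin_str[1:])
--
--         # Create return list
--         rv = []
--         for r in rem_values:
--             if digit in ("0", "X"):
--                 rv.append(r)
--             if digit in ("1", "X"):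
--                 rv.append(2**exp + r)
--
--         return rv
-- ===== SOURCE B (Python) =====
-- def expand_floating(bin_str):
--     """Bottom-up iterative expansion of a binary string with X wildcards."""
--     result = [0]
--     exp = 0
--     for ch in reversed(bin_str):
--         new = []
--         for r in result:
--             if ch in ("0", "X"):
--                 new.append(r)
--             if ch in ("1", "X"):
--                 new.append(2**exp + r)
--         result = new
--         exp += 1
--     return result
-- ===== Notes on version B (the rewrite author's own statement) =====
-- stated objective: faster
-- what changed: Replaced the recursive suffix-expansion with an explicit bottom-up loop over the characters right-to-left, maintaining the value list and the power-of-two exponent as accumulators, eliminating recursion and the per-level string slicing.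
import Mathlib
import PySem

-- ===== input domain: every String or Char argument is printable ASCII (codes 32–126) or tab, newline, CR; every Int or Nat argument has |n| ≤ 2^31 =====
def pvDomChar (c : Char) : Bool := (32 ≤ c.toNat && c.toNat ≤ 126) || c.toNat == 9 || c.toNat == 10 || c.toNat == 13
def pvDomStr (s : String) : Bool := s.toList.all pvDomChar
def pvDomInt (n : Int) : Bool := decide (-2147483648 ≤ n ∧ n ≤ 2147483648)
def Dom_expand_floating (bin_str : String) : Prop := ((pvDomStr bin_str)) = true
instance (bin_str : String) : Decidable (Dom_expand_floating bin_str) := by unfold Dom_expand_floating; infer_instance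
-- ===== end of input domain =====

-- B replaces A's recursion by an explicit bottom-up right-to-left loop with an exponent accumulator; return values are identical.

-- ===== PORT A =====
-- A's recursion on bin_str[1:] ported as structural recursion on the character list.
def expandFloatingRec : List Char → List Int
  | [] => [0]
  | digit :: rest =>
    let exp := rest.length          -- len(bin_str) - 1
    let rem_values := expandFloatingRec rest
    rem_values.foldl (fun rv r =>
      (rv ++ (if digit = '0' ∨ digit = 'X' then [r] else []))
         ++ (if digit = '1' ∨ digit = 'X' then [(2:Int) ^ exp + r] else [])) []

def expand_floating (bin_str : String) : List Int :=
  expandFloatingRec bin_str.toList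

-- ===== PORT B =====
-- B's loop: result = [0]; for ch in reversed(bin_str): rebuild result; exp += 1.
def expand_floating_alt (bin_str : String) : List Int :=
  (bin_str.toList.reverse.foldl (fun (st : List Int × Nat) ch =>
      (st.1.foldl (fun new r =>
        (new ++ (if ch = '0' ∨ ch = 'X' then [r] else []))
           ++ (if ch = '1' ∨ ch = 'X' then [(2:Int) ^ st.2 + r] else [])) [],
       st.2 + 1)) ([0], 0)).1

-- ===== PRECONDITION & SPEC =====
def Spec_expand_floating (bin_str : String) (out : List Int) : Prop := out = expand_floating_alt bin_str
instance (bin_str : String) (out : List Int) : Decidable (Spec_expand_floating bin_str out) := by unfold Spec_expand_floating; infer_instance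

-- ===== CLAIM (what is proved, stated in full; the proofs are below) =====
def Claim_equal_expand_floating : Prop := ∀ (bin_str : String), Dom_expand_floating bin_str → Spec_expand_floating bin_str (expand_floating bin_str)

-- ===== LEMMAS AND PROOFS =====
-- Invariant of B's loop: after consuming l.reverse it holds (expandFloatingRec l, l.length).
theorem expand_floating_loop_inv (l : List Char) :
    l.reverse.foldl (fun (st : List Int × Nat) ch =>
      (st.1.foldl (fun new r =>
        (new ++ (if ch = '0' ∨ ch = 'X' then [r] else []))
           ++ (if ch = '1' ∨ ch = 'X' then [(2:Int) ^ st.2 + r] else [])) [],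
       st.2 + 1)) ([0], 0) = (expandFloatingRec l, l.length) := by
  induction l with
  | nil => rfl
  | cons d rest ih =>
    simp only [List.reverse_cons, List.foldl_append, ih, List.foldl_cons, List.foldl_nil]
    rfl

-- ===== VERDICT (by name: the statement is the Claim_ definition above) =====
theorem expand_floating_spec : Claim_equal_expand_floating := by
  intro s _
  unfold Spec_expand_floating expand_floating expand_floating_alt
  rw [expand_floating_loop_inv]
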